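-- pv_equiv track=rewrite | github.com/lanpartis/jianzhiOffer_practice | 21_popOrder.py | popStack
-- ===== SOURCE A (Python) =====
-- def popStack(stack,pop):
--     if len(stack) is 0:
--         return stack,pop
--     s = stack.pop()
--     p = pop.pop()
--     if s==p:
--         return popStack(stack,pop)
--     stack.append(s)
--     pop.append(p)
--     return stack,pop
-- ===== SOURCE B (Python) =====
-- def popStack(stack, pop):
--     # Count the matching trailing pairs in one pass, then delete them in bulk.
--     k = 0
--     for s, p in zip(reversed(stack), reversed(pop)):
--         if s != p:
--             break
--         k += 1
--     del stack[len(stack) - k:]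
--     del pop[len(pop) - k:]
--     return stack, pop
-- ===== Notes on version B (the rewrite author's own statement) =====
-- stated objective: simpler
-- what changed: Replaces A's one-pair-per-call tail recursion (pop both tops, compare, recurse or push back) with a single pass that counts the matching trailing pairs over zip(reversed(stack), reversed(pop)) and then deletes them in bulk.
-- crash fix: When pop is a strict trailing segment of stack (pop empties while stack is still non-empty, e.g. ([1,2],[2])), A raises IndexError on pop.pop(); B returns the stack with the matched suffix removed and the emptied pop list. — e.g. on popStack([1, 2], [2]): A raises IndexError, B returns ([1], [])
import Mathlib
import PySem

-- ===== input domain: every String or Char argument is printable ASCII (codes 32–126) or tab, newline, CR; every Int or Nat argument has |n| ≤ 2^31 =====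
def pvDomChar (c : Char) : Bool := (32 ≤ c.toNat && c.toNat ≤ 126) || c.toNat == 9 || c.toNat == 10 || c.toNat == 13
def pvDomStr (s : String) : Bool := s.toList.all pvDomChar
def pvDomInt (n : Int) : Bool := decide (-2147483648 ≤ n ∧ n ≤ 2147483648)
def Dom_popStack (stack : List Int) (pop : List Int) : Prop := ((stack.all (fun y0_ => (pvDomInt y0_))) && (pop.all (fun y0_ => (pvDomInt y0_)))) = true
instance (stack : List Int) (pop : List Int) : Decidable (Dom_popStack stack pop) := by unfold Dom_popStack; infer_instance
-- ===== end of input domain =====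

-- B counts the matching trailing pairs in one pass over the zipped reversed lists and deletes
-- them in bulk (simpler, no recursion/re-append); equivalence is about the RETURN value — both
-- Pythons mutate their arguments, with the same net effect on inputs where A returns.

-- ===== PORT A =====
def popStack (stack : List Int) (pop : List Int) : List Int × List Int :=
  if stack.length = 0 then (stack, pop)
  else
    match h1 : PySem.List.pop? stack (-1), PySem.List.pop? pop (-1) with
    | some (s, stack'), some (p, pop') =>
        if s == p then popStack stack' pop'
        else (stack' ++ [s], pop' ++ [p])
    | _, _ => (stack, pop)   -- pop.pop() raises IndexError here (pop empty, stack not): outside Pre_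
  termination_by stack.length
  decreasing_by
    have := PySem.List.length_of_pop?_eq_some stack h1
    simp_all; omega

-- ===== PORT B =====
-- the for-loop with break over zip(reversed(stack), reversed(pop))
def pvCountMatch : List (Int × Int) → Nat
  | [] => 0
  | (s, p) :: rest => if s ≠ p then 0 else pvCountMatch rest + 1

def popStack_alt (stack : List Int) (pop : List Int) : List Int × List Int :=
  let k := pvCountMatch (stack.reverse.zip pop.reverse)
  (stack.take (stack.length - k), pop.take (pop.length - k))   -- del stack[len(stack)-k:] etc.

-- ===== PRECONDITION & SPEC =====
-- Pre_ excludes exactly the inputs where A raises IndexError: pop runs empty while stack is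
-- still non-empty, i.e. pop is shorter than stack and matches stack's trailing part.
def Pre_popStack (stack : List Int) (pop : List Int) : Prop :=
  ¬ (pop.length < stack.length ∧ pop.reverse <+: stack.reverse)
instance (stack : List Int) (pop : List Int) : Decidable (Pre_popStack stack pop) := by
  unfold Pre_popStack; infer_instance

def pvWitness_popStack : List Int × List Int := ([1, 2], [3, 2])

-- A raises IndexError when pop is a strict trailing part of stack (pop empties first); B returns
-- the remaining stack with the matched suffix removed, paired with the emptied pop list.
def Raises_popStack (stack : List Int) (pop : List Int) : Prop :=
  pop.length < stack.length ∧ pop.reverse <+: stack.reverse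
instance (stack : List Int) (pop : List Int) : Decidable (Raises_popStack stack pop) := by
  unfold Raises_popStack; infer_instance
def pvRaiseWitness_popStack : List Int × List Int := ([1, 2], [2])
def pvRaiseWitnessOut_popStack : List Int × List Int := ([1], [])

def Spec_popStack (stack : List Int) (pop : List Int) (out : List Int × List Int) : Prop := out = popStack_alt stack pop
instance (stack : List Int) (pop : List Int) (out : List Int × List Int) : Decidable (Spec_popStack stack pop out) := by unfold Spec_popStack; infer_instance

-- ===== CLAIM (what is proved, stated in full; the proofs are below) =====
def Claim_equal_popStack : Prop := ∀ (stack : List Int) (pop : List Int), Dom_popStack stack pop → Pre_popStack stack pop → Spec_popStack stack pop (popStack stack pop)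

def Claim_raises_popStack : Prop := (∀ (stack : List Int) (pop : List Int), Dom_popStack stack pop → Raises_popStack stack pop → ¬ Pre_popStack stack pop) ∧ (Dom_popStack (pvRaiseWitness_popStack.1) (pvRaiseWitness_popStack.2) ∧ Raises_popStack (pvRaiseWitness_popStack.1) (pvRaiseWitness_popStack.2) ∧ popStack_alt (pvRaiseWitness_popStack.1) (pvRaiseWitness_popStack.2) = pvRaiseWitnessOut_popStack)

-- ===== LEMMAS AND PROOFS =====

-- A on reversed views: popStack (rs.reverse) (rp.reverse) drops the matched prefix of rs and rp.
lemma popStack_key : ∀ (rs rp : List Int),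
    ¬ (rp.length < rs.length ∧ rp <+: rs) →
    popStack rs.reverse rp.reverse =
      ((rs.drop (pvCountMatch (rs.zip rp))).reverse,
       (rp.drop (pvCountMatch (rs.zip rp))).reverse) := by
  intro rs
  induction rs with
  | nil => intro rp _; rw [popStack.eq_def]; simp [pvCountMatch]
  | cons s rs' ih =>
    intro rp h
    cases rp with
    | nil => exact absurd ⟨by simp, List.nil_prefix⟩ h
    | cons p rp' =>
      rw [popStack.eq_def]
      have hs : (s :: rs').reverse = rs'.reverse ++ [s] := by simp
      have hp : (p :: rp').reverse = rp'.reverse ++ [p] := by simp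
      rw [hs, hp, PySem.List.pop?_last, PySem.List.pop?_last]
      simp only [List.length_append, List.length_reverse]
      by_cases hsp : s = p
      · subst hsp
        have h' : ¬ (rp'.length < rs'.length ∧ rp' <+: rs') := by
          intro ⟨h1, h2⟩
          exact h ⟨by simpa using Nat.succ_lt_succ h1, List.cons_prefix_cons.mpr ⟨rfl, h2⟩⟩
        have := ih rp' h'
        simp [this, pvCountMatch]
      · simp [hsp, pvCountMatch, beq_iff_eq]

lemma take_eq_reverse_drop (xs : List Int) (k : Nat) :
    (xs.reverse.drop k).reverse = xs.take (xs.length - k) := by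
  rw [List.drop_reverse]; simp

-- ===== VERDICT (by name: the statement is the Claim_ definition above) =====
theorem popStack_spec : Claim_equal_popStack := by
  intro stack pop _ hpre
  unfold Spec_popStack popStack_alt
  have h := popStack_key stack.reverse pop.reverse (by simpa [Pre_popStack] using hpre)
  simp only [List.reverse_reverse] at h
  rw [h, take_eq_reverse_drop, take_eq_reverse_drop]

def popStack_raises : Claim_raises_popStack := by
  unfold Claim_raises_popStack
  exact ⟨fun _ _ _ hr hp => hp hr, by decide⟩
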